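-- pv_equiv track=rewrite | github.com/ckoons/BubbleSpacetimeTheory | play/toy_961_bc2_sat_solver.py | find_backbone
-- ===== SOURCE A (Python) =====
-- def find_backbone(n, solutions):
--     """Find backbone: variables fixed in ALL solutions."""
--     if not solutions:
--         return set(), set(), set()  # backbone_true, backbone_false, free
--     bb_true = set(range(n))
--     bb_false = set(range(n))
--     for sol in solutions:
--         for i in range(n):
--             if not sol[i]:
--                 bb_true.discard(i)
--             if sol[i]:
--                 bb_false.discard(i)
--     free = set(range(n)) - bb_true - bb_false
--     return bb_true, bb_false, free
-- ===== SOURCE B (Python) =====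
-- def find_backbone(n, solutions):
--     """Find backbone: variables fixed in ALL solutions."""
--     if not solutions:
--         return set(), set(), set()
--     bb_true, bb_false, free = set(), set(), set()
--     for i in range(n):
--         vals = [bool(sol[i]) for sol in solutions]
--         if all(vals):
--             bb_true.add(i)
--         elif not any(vals):
--             bb_false.add(i)
--         else:
--             free.add(i)
--     return bb_true, bb_false, free
-- ===== Notes on version B (the rewrite author's own statement) =====
-- stated objective: alternative
-- what changed: B transposes the traversal: instead of initializing full backbone sets and discarding indices while looping solutions-then-variables, it loops over each variable once, gathers its column of truth values across all solutions, and classifies it directly into backbone_true/backbone_false/free.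
import Mathlib
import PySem

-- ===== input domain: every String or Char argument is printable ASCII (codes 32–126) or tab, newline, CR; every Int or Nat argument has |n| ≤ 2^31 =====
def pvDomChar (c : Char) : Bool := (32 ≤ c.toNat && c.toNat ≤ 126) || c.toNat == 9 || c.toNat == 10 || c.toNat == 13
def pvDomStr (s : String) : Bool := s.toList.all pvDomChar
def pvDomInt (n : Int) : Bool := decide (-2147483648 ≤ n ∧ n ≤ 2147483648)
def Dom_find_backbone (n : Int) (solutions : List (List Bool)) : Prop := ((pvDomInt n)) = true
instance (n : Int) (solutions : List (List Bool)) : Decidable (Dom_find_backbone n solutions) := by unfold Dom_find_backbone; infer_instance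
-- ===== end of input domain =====

-- B transposes the computation: instead of initializing full backbone sets and discarding
-- per solution, it classifies each variable once from its column of truth values (alternative decomposition).

-- ===== PORT A =====
def fbDiscardStep (sol : List Bool) (st : List Int × List Int) (i : Int) : List Int × List Int :=
  let st1 := if !(PySem.List.pyGetD sol i false) then (PySem.Set.discard st.1 i, st.2) else st
  if PySem.List.pyGetD sol i false then (st1.1, PySem.Set.discard st1.2 i) else st1

def fbSolStep (n : Int) (st : List Int × List Int) (sol : List Bool) : List Int × List Int :=
  (PySem.List.pyRange 0 n 1).foldl (fbDiscardStep sol) st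

def find_backbone (n : Int) (solutions : List (List Bool)) : List Int × List Int × List Int :=
  if solutions = [] then ([], [], [])
  else
    ((solutions.foldl (fbSolStep n)
        (PySem.Set.ofList (PySem.List.pyRange 0 n 1), PySem.Set.ofList (PySem.List.pyRange 0 n 1))).1,
     (solutions.foldl (fbSolStep n)
        (PySem.Set.ofList (PySem.List.pyRange 0 n 1), PySem.Set.ofList (PySem.List.pyRange 0 n 1))).2,
     PySem.Set.diff
       (PySem.Set.diff (PySem.Set.ofList (PySem.List.pyRange 0 n 1))
         (solutions.foldl (fbSolStep n)
           (PySem.Set.ofList (PySem.List.pyRange 0 n 1), PySem.Set.ofList (PySem.List.pyRange 0 n 1))).1)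
       (solutions.foldl (fbSolStep n)
         (PySem.Set.ofList (PySem.List.pyRange 0 n 1), PySem.Set.ofList (PySem.List.pyRange 0 n 1))).2)

-- ===== PORT B =====
def fbClassifyStep (solutions : List (List Bool)) (st : List Int × List Int × List Int) (i : Int) :
    List Int × List Int × List Int :=
  let vals := solutions.map (fun sol => PySem.List.pyGetD sol i false)
  if vals.all id then (PySem.Set.add st.1 i, st.2.1, st.2.2)
  else if !(vals.any id) then (st.1, PySem.Set.add st.2.1 i, st.2.2)
  else (st.1, st.2.1, PySem.Set.add st.2.2 i)

def find_backbone_alt (n : Int) (solutions : List (List Bool)) : List Int × List Int × List Int :=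
  if solutions = [] then ([], [], [])
  else (PySem.List.pyRange 0 n 1).foldl (fbClassifyStep solutions) ([], [], [])

-- ===== PRECONDITION & SPEC =====
-- Pre_ excludes exactly the inputs where Python A raises IndexError: some solution row shorter
-- than n while the index loop actually runs (solutions nonempty and n > 0).
def Pre_find_backbone (n : Int) (solutions : List (List Bool)) : Prop :=
  solutions = [] ∨ n ≤ 0 ∨ ∀ sol ∈ solutions, n ≤ (sol.length : Int)
instance (n : Int) (solutions : List (List Bool)) : Decidable (Pre_find_backbone n solutions) := by
  unfold Pre_find_backbone; infer_instance
def pvWitness_find_backbone : Int × List (List Bool) := (2, [[true, false], [true, true]])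

def Spec_find_backbone (n : Int) (solutions : List (List Bool)) (out : List Int × List Int × List Int) : Prop := out = find_backbone_alt n solutions
instance (n : Int) (solutions : List (List Bool)) (out : List Int × List Int × List Int) : Decidable (Spec_find_backbone n solutions out) := by unfold Spec_find_backbone; infer_instance

-- ===== CLAIM (what is proved, stated in full; the proofs are below) =====
def Claim_equal_find_backbone : Prop := ∀ (n : Int) (solutions : List (List Bool)), Dom_find_backbone n solutions → Pre_find_backbone n solutions → Spec_find_backbone n solutions (find_backbone n solutions)

-- ===== LEMMAS AND PROOFS =====

theorem fb_diff_filter (s t : List Int) :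
    PySem.Set.diff s t = s.filter (fun y => !(PySem.Set.contains t y)) := rfl

-- A's inner loop over js discards from both components: it is a filter.
theorem fb_inner (sol : List Bool) (js : List Int) :
    ∀ s t : List Int, js.foldl (fbDiscardStep sol) (s, t) =
      (s.filter (fun i => PySem.List.pyGetD sol i false || !(js.contains i)),
       t.filter (fun i => !(PySem.List.pyGetD sol i false) || !(js.contains i))) := by
  induction js with
  | nil => intro s t; simp
  | cons j js ih =>
    intro s t
    have hstep : fbDiscardStep sol (s, t) j =
        (if PySem.List.pyGetD sol j false then s else PySem.Set.discard s j,
         if PySem.List.pyGetD sol j false then PySem.Set.discard t j else t) := by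
      by_cases h : PySem.List.pyGetD sol j false <;> simp [fbDiscardStep, h]
    rw [List.foldl_cons, hstep, ih]
    by_cases h : PySem.List.pyGetD sol j false
    · rw [if_pos h, if_pos h]
      refine Prod.ext ?_ ?_
      · refine List.filter_congr ?_
        intro i _
        by_cases hij : i = j <;> simp [hij, h]
      · rw [show PySem.Set.discard t j = t.filter (fun i => !(i == j)) from rfl,
            List.filter_filter]
        refine List.filter_congr ?_
        intro i _
        by_cases hij : i = j <;> simp [hij, h]
    · rw [if_neg h, if_neg h]
      refine Prod.ext ?_ ?_
      · rw [show PySem.Set.discard s j = s.filter (fun i => !(i == j)) from rfl,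
            List.filter_filter]
        refine List.filter_congr ?_
        intro i _
        by_cases hij : i = j <;> simp [hij, h]
      · refine List.filter_congr ?_
        intro i _
        by_cases hij : i = j <;> simp [hij, h]

-- A's outer loop over the solutions accumulates conjunctions of per-solution filters.
theorem fb_outer (n : Int) (sols : List (List Bool)) :
    ∀ p q : Int → Bool,
      sols.foldl (fbSolStep n) ((PySem.List.pyRange 0 n 1).filter p, (PySem.List.pyRange 0 n 1).filter q) =
        ((PySem.List.pyRange 0 n 1).filter (fun i => p i && sols.all (fun sol => PySem.List.pyGetD sol i false)),
         (PySem.List.pyRange 0 n 1).filter (fun i => q i && sols.all (fun sol => !(PySem.List.pyGetD sol i false)))) := by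
  induction sols with
  | nil => intro p q; simp
  | cons sol sols ih =>
    intro p q
    rw [List.foldl_cons]
    have hone : fbSolStep n ((PySem.List.pyRange 0 n 1).filter p, (PySem.List.pyRange 0 n 1).filter q) sol =
        ((PySem.List.pyRange 0 n 1).filter (fun i => p i && PySem.List.pyGetD sol i false),
         (PySem.List.pyRange 0 n 1).filter (fun i => q i && !(PySem.List.pyGetD sol i false))) := by
      unfold fbSolStep
      rw [fb_inner]
      rw [List.filter_filter, List.filter_filter]
      refine Prod.ext ?_ ?_ <;>
      · refine List.filter_congr ?_
        intro i hi
        obtain ⟨h0, h1⟩ := PySem.List.mem_pyRange_one.mp hi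
        simp [h0, h1, Bool.and_comm]
    rw [hone, ih]
    refine Prod.ext ?_ ?_ <;>
    · refine List.filter_congr ?_
      intro i _
      simp [Bool.and_assoc]

-- B's loop appends each classified variable to the matching component.
theorem fb_alt_loop (solutions : List (List Bool)) (js : List Int) :
    ∀ a b c : List Int, js.Nodup → (∀ x ∈ js, x ∉ a) → (∀ x ∈ js, x ∉ b) → (∀ x ∈ js, x ∉ c) →
      js.foldl (fbClassifyStep solutions) (a, b, c) =
        (a ++ js.filter (fun i => solutions.all (fun sol => PySem.List.pyGetD sol i false)),
         b ++ js.filter (fun i => !(solutions.all (fun sol => PySem.List.pyGetD sol i false))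
                              && !(solutions.any (fun sol => PySem.List.pyGetD sol i false))),
         c ++ js.filter (fun i => !(solutions.all (fun sol => PySem.List.pyGetD sol i false))
                              && (solutions.any (fun sol => PySem.List.pyGetD sol i false)))) := by
  induction js with
  | nil => intro a b c _ _ _ _; simp
  | cons j js ih =>
    intro a b c hnd ha hb hc
    have hndj : js.Nodup := (List.nodup_cons.mp hnd).2
    have hjj : j ∉ js := (List.nodup_cons.mp hnd).1
    rw [List.foldl_cons]
    have hdj : ∀ (d : List Int), (∀ x ∈ j :: js, x ∉ d) → ∀ x ∈ js, x ∉ d ++ [j] := by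
      intro d hd x hx hmem
      rcases List.mem_append.mp hmem with hm | hm
      · exact hd x (by simp [hx]) hm
      · simp only [List.mem_singleton] at hm
        exact hjj (hm ▸ hx)
    by_cases hall : solutions.all (fun sol => PySem.List.pyGetD sol j false)
    · have hstep : fbClassifyStep solutions (a, b, c) j = (a ++ [j], b, c) := by
        simp [fbClassifyStep, hall, PySem.Set.add_of_not_mem (ha j (by simp))]
      rw [hstep, ih (a ++ [j]) b c hndj (hdj a ha)
        (fun x hx => hb x (by simp [hx])) (fun x hx => hc x (by simp [hx]))]
      refine Prod.ext ?_ (Prod.ext ?_ ?_)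
      · show a ++ [j] ++ _ = a ++ _
        rw [List.filter_cons_of_pos (by simp [hall]), List.append_assoc]; rfl
      · show b ++ _ = b ++ _
        rw [List.filter_cons_of_neg (by simp [hall])]
      · show c ++ _ = c ++ _
        rw [List.filter_cons_of_neg (by simp [hall])]
    · have hallF : solutions.all (fun sol => PySem.List.pyGetD sol j false) = false :=
        Bool.eq_false_iff.mpr hall
      by_cases hany : solutions.any (fun sol => PySem.List.pyGetD sol j false)
      · have hstep : fbClassifyStep solutions (a, b, c) j = (a, b, c ++ [j]) := by
          simp [fbClassifyStep, hallF, hany, PySem.Set.add_of_not_mem (hc j (by simp))]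
        rw [hstep, ih a b (c ++ [j]) hndj
          (fun x hx => ha x (by simp [hx])) (fun x hx => hb x (by simp [hx])) (hdj c hc)]
        refine Prod.ext ?_ (Prod.ext ?_ ?_)
        · show a ++ _ = a ++ _
          rw [List.filter_cons_of_neg (by simp [hallF])]
        · show b ++ _ = b ++ _
          rw [List.filter_cons_of_neg (by simp [hany])]
        · show c ++ [j] ++ _ = c ++ _
          rw [List.filter_cons_of_pos (by simp [hallF, hany]), List.append_assoc]; rfl
      · have hanyF : solutions.any (fun sol => PySem.List.pyGetD sol j false) = false :=
          Bool.eq_false_iff.mpr hany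
        have hstep : fbClassifyStep solutions (a, b, c) j = (a, b ++ [j], c) := by
          simp [fbClassifyStep, hallF, hanyF, PySem.Set.add_of_not_mem (hb j (by simp))]
        rw [hstep, ih a (b ++ [j]) c hndj
          (fun x hx => ha x (by simp [hx])) (hdj b hb) (fun x hx => hc x (by simp [hx]))]
        refine Prod.ext ?_ (Prod.ext ?_ ?_)
        · show a ++ _ = a ++ _
          rw [List.filter_cons_of_neg (by simp [hallF])]
        · show b ++ [j] ++ _ = b ++ _
          rw [List.filter_cons_of_pos (by simp [hallF, hanyF]), List.append_assoc]; rfl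
        · show c ++ _ = c ++ _
          rw [List.filter_cons_of_neg (by simp [hanyF])]

-- Set membership of a filtered list at a member of the base list.
theorem contains_filter_of_mem {p : Int → Bool} {l : List Int} {i : Int} (hi : i ∈ l) :
    PySem.Set.contains (l.filter p) i = p i := by
  cases hq : p i
  · refine Bool.eq_false_iff.mpr ?_
    intro hc
    have h1 := (PySem.Set.contains_iff _ _).mp hc
    have h2 := (List.mem_filter.mp h1).2
    simp [hq] at h2
  · exact (PySem.Set.contains_iff _ _).mpr (List.mem_filter.mpr ⟨hi, by simp [hq]⟩)

-- A's value on a nonempty solution list, as three filters of range(n).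
theorem fbA_char (n : Int) (sols : List (List Bool)) (hs : sols ≠ []) :
    find_backbone n sols =
      ((PySem.List.pyRange 0 n 1).filter (fun i => sols.all (fun sol => PySem.List.pyGetD sol i false)),
       (PySem.List.pyRange 0 n 1).filter (fun i => sols.all (fun sol => !(PySem.List.pyGetD sol i false))),
       (PySem.List.pyRange 0 n 1).filter (fun i => !(sols.all (fun sol => PySem.List.pyGetD sol i false))
                          && !(sols.all (fun sol => !(PySem.List.pyGetD sol i false))))) := by
  have hnd : (PySem.List.pyRange 0 n 1).Nodup := PySem.List.nodup_pyRange_one 0 n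
  have hofl : PySem.Set.ofList (PySem.List.pyRange 0 n 1) = PySem.List.pyRange 0 n 1 :=
    PySem.Set.ofList_eq_self_of_nodup _ hnd
  have hE : sols.foldl (fbSolStep n)
      (PySem.Set.ofList (PySem.List.pyRange 0 n 1), PySem.Set.ofList (PySem.List.pyRange 0 n 1)) =
      ((PySem.List.pyRange 0 n 1).filter (fun i => true && sols.all (fun sol => PySem.List.pyGetD sol i false)),
       (PySem.List.pyRange 0 n 1).filter (fun i => true && sols.all (fun sol => !(PySem.List.pyGetD sol i false)))) := by
    rw [hofl]
    conv_lhs => rw [show PySem.List.pyRange 0 n 1 = (PySem.List.pyRange 0 n 1).filter (fun _ => true) by simp]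
    exact fb_outer n sols (fun _ => true) (fun _ => true)
  unfold find_backbone
  rw [if_neg hs, hE, hofl]
  refine Prod.ext ?_ (Prod.ext ?_ ?_)
  · refine List.filter_congr ?_; intro i _; rw [Bool.true_and]
  · refine List.filter_congr ?_; intro i _; rw [Bool.true_and]
  · show PySem.Set.diff (PySem.Set.diff _ _) _ = _
    rw [fb_diff_filter, fb_diff_filter, List.filter_filter]
    refine List.filter_congr ?_
    intro i hi
    rw [contains_filter_of_mem hi, contains_filter_of_mem hi, Bool.true_and, Bool.true_and,
      Bool.and_comm]

-- ===== VERDICT (by name: the statement is the Claim_ definition above) =====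
theorem find_backbone_spec : Claim_equal_find_backbone := by
  intro n solutions _ _
  unfold Spec_find_backbone
  by_cases hs : solutions = []
  · simp [find_backbone, find_backbone_alt, hs]
  · obtain ⟨s0, rest, rfl⟩ := List.exists_cons_of_ne_nil hs
    have hnd : (PySem.List.pyRange 0 n 1).Nodup := PySem.List.nodup_pyRange_one 0 n
    have hB : find_backbone_alt n (s0 :: rest) =
        ((PySem.List.pyRange 0 n 1).filter (fun i => (s0 :: rest).all (fun sol => PySem.List.pyGetD sol i false)),
         (PySem.List.pyRange 0 n 1).filter (fun i => !((s0 :: rest).all (fun sol => PySem.List.pyGetD sol i false))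
                          && !((s0 :: rest).any (fun sol => PySem.List.pyGetD sol i false))),
         (PySem.List.pyRange 0 n 1).filter (fun i => !((s0 :: rest).all (fun sol => PySem.List.pyGetD sol i false))
                          && ((s0 :: rest).any (fun sol => PySem.List.pyGetD sol i false)))) := by
      unfold find_backbone_alt
      rw [if_neg hs]
      rw [fb_alt_loop (s0 :: rest) (PySem.List.pyRange 0 n 1) [] [] [] hnd (by simp) (by simp) (by simp)]
      simp
    rw [fbA_char n (s0 :: rest) hs, hB]
    refine Prod.ext ?_ (Prod.ext ?_ ?_)
    · rfl
    · refine List.filter_congr ?_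
      intro i _
      by_cases h0 : PySem.List.pyGetD s0 i false <;>
        simp [h0, List.all_eq_not_any_not]
    · refine List.filter_congr ?_
      intro i _
      simp [List.all_eq_not_any_not]
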